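-- pv_equiv track=rewrite | github.com/ShenYuzhe/deep_learning_study | nlp_2n.py | count_combined_corpus
-- ===== SOURCE A (Python) =====
-- def combine_corpus(tokens):
-- 	return '-'.join(tokens)
--
-- def count_combined_corpus(tokens, n=2):
-- 	seq = []
-- 	combined_corpus_freq = dict()
-- 	for token in tokens:
-- 		seq.append(token)
-- 		if len(seq) == n:
-- 			combined_corpus = combine_corpus(seq)
-- 			combined_corpus_freq[combined_corpus] = (
-- 				combined_corpus_freq.get(combined_corpus, 0) + 1)
-- 			seq.pop(0)
-- 	return combined_corpus_freq
-- ===== SOURCE B (Python) =====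
-- def count_combined_corpus(tokens, n=2):
-- 	tokens = list(tokens)
-- 	if n < 1:
-- 		return {}
-- 	freq = {}
-- 	for i in range(len(tokens) - n + 1):
-- 		key = '-'.join(tokens[i:i + n])
-- 		freq[key] = freq.get(key, 0) + 1
-- 	return freq
-- ===== Notes on version B (the rewrite author's own statement) =====
-- stated objective: idiomatic
-- what changed: Replaces the incremental sliding buffer (append, count when full, pop front) with a direct index loop over range(len(tokens)-n+1) that slices each n-gram out of the list and counts it.
import Mathlib
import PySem

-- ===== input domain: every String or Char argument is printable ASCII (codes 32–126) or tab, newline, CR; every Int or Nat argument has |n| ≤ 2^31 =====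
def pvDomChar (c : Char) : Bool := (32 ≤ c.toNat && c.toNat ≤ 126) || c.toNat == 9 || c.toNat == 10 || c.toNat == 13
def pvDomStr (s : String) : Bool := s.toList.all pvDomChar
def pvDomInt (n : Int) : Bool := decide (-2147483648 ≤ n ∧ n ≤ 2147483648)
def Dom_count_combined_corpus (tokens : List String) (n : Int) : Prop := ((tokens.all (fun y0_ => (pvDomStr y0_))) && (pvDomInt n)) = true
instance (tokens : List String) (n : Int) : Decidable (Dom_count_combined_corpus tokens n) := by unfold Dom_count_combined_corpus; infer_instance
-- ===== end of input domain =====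

-- B replaces A's incremental sliding buffer (append, count when full, pop front) with a
-- direct index loop that slices each n-gram out of the list (idiomatic; same cost).

-- ===== PORT A =====
def combine_corpus (tokens : List String) : String :=
  PySem.Str.join "-" tokens

def count_step (n : Int) (st : List String × PySem.Dict String Int) (token : String) :
    List String × PySem.Dict String Int :=
  let seq := st.1 ++ [token]
  if (seq.length : Int) = n then
    let cc := combine_corpus seq
    (seq.tail, st.2.insert cc (st.2.getD cc 0 + 1))   -- seq.pop(0) on a nonempty list is tail
  else (seq, st.2)

def count_combined_corpus (tokens : List String) (n : Int) : List (String × Int) :=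
  (tokens.foldl (count_step n) ([], PySem.Dict.empty)).2.items

-- ===== PORT B =====
def count_combined_corpus_alt (tokens : List String) (n : Int) : List (String × Int) :=
  if n < 1 then []
  else
    ((PySem.List.pyRange 0 ((tokens.length : Int) - n + 1) 1).foldl
      (fun (d : PySem.Dict String Int) i =>
        let key := PySem.Str.join "-" (PySem.List.slice tokens (some i) (some (i + n)))
        d.insert key (d.getD key 0 + 1))
      PySem.Dict.empty).items

-- ===== PRECONDITION & SPEC =====
def Spec_count_combined_corpus (tokens : List String) (n : Int) (out : List (String × Int)) : Prop := out = count_combined_corpus_alt tokens n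
instance (tokens : List String) (n : Int) (out : List (String × Int)) : Decidable (Spec_count_combined_corpus tokens n out) := by unfold Spec_count_combined_corpus; infer_instance

-- ===== CLAIM (what is proved, stated in full; the proofs are below) =====
def Claim_equal_count_combined_corpus : Prop := ∀ (tokens : List String) (n : Int), Dom_count_combined_corpus tokens n → Spec_count_combined_corpus tokens n (count_combined_corpus tokens n)

-- ===== LEMMAS AND PROOFS =====

/-- the dict update `d[k] = d.get(k, 0) + 1` both programs perform -/
def pvIncr (d : PySem.Dict String Int) (k : String) : PySem.Dict String Int :=
  d.insert k (d.getD k 0 + 1)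

/-- For n < 1 the window-full test `len(seq) == n` never fires, so A's dict stays empty. -/
lemma foldA_lt_one (n : Int) (hn : n < 1) :
    ∀ (ts s : List String) (d : PySem.Dict String Int),
      (ts.foldl (count_step n) (s, d)).2 = d := by
  intro ts
  induction ts with
  | nil => intro s d; rfl
  | cons t ts ih =>
      intro s d
      have hne : ((s ++ [t]).length : Int) ≠ n := by
        simp only [List.length_append, List.length_singleton]
        omega
      simp only [List.foldl_cons, count_step, if_neg hne]
      exact ih _ _

/-- Main invariant for A's sliding-buffer loop: starting from a buffer `s` shorter than the
window size `m`, the dict accumulated over `ts` counts exactly the length-`m` windows of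
`s ++ ts`, left to right. -/
lemma foldA_eq (m : Nat) (hm : 1 ≤ m) :
    ∀ (ts s : List String) (d : PySem.Dict String Int), s.length < m →
      (ts.foldl (count_step (m : Int)) (s, d)).2 =
      (List.range (s.length + ts.length + 1 - m)).foldl
        (fun d i => pvIncr d (combine_corpus (((s ++ ts).drop i).take m))) d := by
  intro ts
  induction ts with
  | nil =>
      intro s d hs
      have : s.length + 0 + 1 - m = 0 := by omega
      simp [this]
  | cons t ts ih =>
      intro s d hs
      by_cases hfull : s.length + 1 = m
      · have hcond : (((s ++ [t]).length : Int)) = (m : Int) := by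
          simp only [List.length_append, List.length_singleton]; exact_mod_cast hfull
        simp only [List.foldl_cons, count_step, if_pos hcond]
        have htl : (s ++ [t]).tail.length < m := by
          simp only [List.length_tail, List.length_append, List.length_singleton]; omega
        rw [ih ((s ++ [t]).tail) _ htl]
        have hcnt : (s ++ [t]).tail.length + ts.length + 1 - m = ts.length := by
          simp only [List.length_tail, List.length_append, List.length_singleton]; omega
        have hcnt' : s.length + (t :: ts).length + 1 - m = ts.length + 1 := by
          simp only [List.length_cons]; omega
        rw [hcnt, hcnt', List.range_succ_eq_map, List.foldl_cons, List.foldl_map]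
        have htake : ((s ++ t :: ts).drop 0).take m = s ++ [t] := by
          rw [List.drop_zero, ← hfull, List.take_append]
          simp [List.take_of_length_le]
        rw [htake]
        apply PySem.List.foldl_congr_mem
        intro d' i _
        congr 2
        · -- drop (i+1) ((s++[t]) ++ ts) = drop i ((s++[t]).tail ++ ts)
          have hne : s ++ [t] ≠ [] := by simp
          obtain ⟨h, l, hl⟩ := List.exists_cons_of_ne_nil hne
          have : s ++ t :: ts = h :: (l ++ ts) := by
            rw [← List.cons_append, ← hl]; simp
          rw [this, hl]
          simp [Nat.succ_eq_add_one, List.drop_succ_cons]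
      · have hlt : s.length + 1 < m := by omega
        have hcond : (((s ++ [t]).length : Int)) ≠ (m : Int) := by
          simp only [List.length_append, List.length_singleton]
          exact_mod_cast fun h => hfull h
        simp only [List.foldl_cons, count_step, if_neg hcond]
        rw [ih (s ++ [t]) d (by simpa using hlt)]
        have h1 : (s ++ [t]).length + ts.length + 1 - m = s.length + (t :: ts).length + 1 - m := by
          simp; omega
        have h2 : (s ++ [t]) ++ ts = s ++ t :: ts := by simp
        rw [h1, h2]

/-- B's index loop, rewritten as the same fold over `List.range`. -/
lemma altB_eq (tokens : List String) (m : Nat) (hm : 1 ≤ m) :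
    count_combined_corpus_alt tokens (m : Int) =
    ((List.range (tokens.length + 1 - m)).foldl
      (fun d i => pvIncr d (combine_corpus ((tokens.drop i).take m))) PySem.Dict.empty).items := by
  unfold count_combined_corpus_alt
  have hnlt : ¬ ((m : Int) < 1) := by exact_mod_cast Nat.not_lt.mpr hm
  rw [if_neg hnlt, PySem.List.pyRange_one]
  have hcnt : (((tokens.length : Int) - (m : Int) + 1) - 0).toNat = tokens.length + 1 - m := by
    omega
  rw [hcnt, List.foldl_map]
  apply congrArg PySem.Dict.items
  apply PySem.List.foldl_congr_mem
  intro d k _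
  simp only [zero_add, PySem.List.slice_natCast_add]
  rfl

-- ===== VERDICT (by name: the statement is the Claim_ definition above) =====
theorem count_combined_corpus_spec : Claim_equal_count_combined_corpus := by
  intro tokens n _
  unfold Spec_count_combined_corpus
  by_cases hn : n < 1
  · unfold count_combined_corpus count_combined_corpus_alt
    rw [if_pos hn, foldA_lt_one n hn tokens [] PySem.Dict.empty]
    rfl
  · have hm1 : 1 ≤ n.toNat := by omega
    have hnm : n = ((n.toNat : Nat) : Int) := by omega
    rw [hnm, altB_eq tokens n.toNat hm1]
    unfold count_combined_corpus
    rw [foldA_eq n.toNat hm1 tokens [] PySem.Dict.empty (by simp only [List.length_nil]; omega)]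
    simp
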